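-- pv_equiv track=rewrite | github.com/izaxs/algo | Archived/snakecode/other/dogfood.py | feedDog
-- ===== SOURCE A (Python) =====
-- def feedDog(sp: list[str], k: int) -> int:
--     feedCount = 0
--     nextDog = 0
--     for i, v in enumerate(sp):
--         if v != 'F': continue
--         while nextDog < min(i+k+1, len(sp)):
--             if sp[nextDog] != 'D':
--                 nextDog += 1
--                 continue
--             if abs(nextDog-i) <= k: break
--             nextDog += 1
--         if nextDog == len(sp): return feedCount
--         if sp[nextDog] == 'D' and abs(nextDog-i) <= k:
--             feedCount += 1
--             nextDog += 1
--     return feedCount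
-- ===== SOURCE B (Python) =====
-- def feedDog(sp: list[str], k: int) -> int:
--     dogs = [i for i, v in enumerate(sp) if v == 'D']
--     feeders = [i for i, v in enumerate(sp) if v == 'F']
--     count = 0
--     i = 0
--     j = 0
--     while i < len(dogs) and j < len(feeders):
--         d = dogs[i]
--         f = feeders[j]
--         if d < f - k:
--             i += 1
--         elif d > f + k:
--             j += 1
--         else:
--             count += 1
--             i += 1
--             j += 1
--     return count
-- ===== Notes on version B (the rewrite author's own statement) =====
-- stated objective: alternative
-- what changed: A scans the combined array feeder-by-feeder with an embedded nextDog rescan over raw cells (skipping non-dogs, early return); B first extracts the dog and feeder index sequences and then counts matches with a single symmetric three-way merge of the two sorted sequences (drop the dog if it is left of the window, drop the feeder if the dog is right of it, else match both).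
import Mathlib
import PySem

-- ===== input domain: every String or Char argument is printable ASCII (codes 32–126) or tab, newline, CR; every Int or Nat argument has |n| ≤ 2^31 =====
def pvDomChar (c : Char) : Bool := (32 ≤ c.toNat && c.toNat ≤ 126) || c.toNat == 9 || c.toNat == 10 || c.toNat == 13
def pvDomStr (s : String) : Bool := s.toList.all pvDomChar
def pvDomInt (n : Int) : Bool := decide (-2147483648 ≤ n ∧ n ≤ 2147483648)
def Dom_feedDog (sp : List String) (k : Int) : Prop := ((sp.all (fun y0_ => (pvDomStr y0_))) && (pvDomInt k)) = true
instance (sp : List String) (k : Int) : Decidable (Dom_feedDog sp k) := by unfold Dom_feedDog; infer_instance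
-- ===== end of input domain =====

-- B replaces A's scan of the combined array (with its embedded dog-pointer rescan and early
-- return) by extracting the dog and feeder position sequences and counting matches with a
-- symmetric three-way merge of the two sorted sequences (objective: alternative; same results).

-- ===== PORT A =====
-- A's inner `while` loop: advance nextDog while nextDog < min(i+k+1, len(sp)),
-- skipping non-dogs and out-of-range dogs, breaking at an in-range dog.
-- (fuel-guarded structural recursion; fuel = len(sp) always suffices: nd grows by 1 per
-- iteration and the loop condition forces nd < len(sp))
def feedWhileF (sp : List String) (k : Int) (i : Nat) : Nat → Nat → Nat
  | 0, nd => nd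
  | fuel + 1, nd =>
    if h : (nd : Int) < min ((i : Int) + k + 1) (sp.length : Int) then
      have hlt : nd < sp.length := by
        have := min_le_right ((i : Int) + k + 1) (sp.length : Int); omega
      if sp[nd] ≠ "D" then feedWhileF sp k i fuel (nd + 1)
      else if |(nd : Int) - (i : Int)| ≤ k then nd
      else feedWhileF sp k i fuel (nd + 1)
    else nd

def feedWhile (sp : List String) (k : Int) (i : Nat) (nd : Nat) : Nat :=
  feedWhileF sp k i sp.length nd

-- A's outer `for i, v in enumerate(sp)` loop with its early `return feedCount`.
def feedGoF (sp : List String) (k : Int) : Nat → Nat → Nat → Int → Int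
  | 0, _, _, count => count
  | fuel + 1, i, nd, count =>
    if h : i < sp.length then
      if sp[i] ≠ "F" then feedGoF sp k fuel (i + 1) nd count
      else
        -- feedWhile sp k i nd below stands for A's nextDog after the inner while loop
        if feedWhile sp k i nd = sp.length then count
        else if (sp[feedWhile sp k i nd]?).getD "" = "D" ∧ |(feedWhile sp k i nd : Int) - (i : Int)| ≤ k then
          feedGoF sp k fuel (i + 1) (feedWhile sp k i nd + 1) (count + 1)
        else feedGoF sp k fuel (i + 1) (feedWhile sp k i nd) count
    else count

def feedDog (sp : List String) (k : Int) : Int := feedGoF sp k sp.length 0 0 0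

-- ===== PORT B =====
-- the two comprehensions [i for i, v in enumerate(sp) if v == c]
def idxsOf (sp : List String) (c : String) : List Int :=
  (PySem.List.enumerate sp).filterMap (fun iv => if iv.2 = c then some iv.1 else none)

-- B's `while i < len(dogs) and j < len(feeders)` three-way merge loop.
-- (fuel-guarded structural recursion; each iteration advances i or j, so
-- fuel = len(dogs) + len(feeders) always suffices)
def mergeGoF (k : Int) (dogs feeders : List Int) : Nat → Nat → Nat → Int → Int
  | 0, _, _, count => count
  | fuel + 1, i, j, count =>
    if h : i < dogs.length ∧ j < feeders.length then
      if dogs[i] < feeders[j] - k then mergeGoF k dogs feeders fuel (i + 1) j count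
      else if dogs[i] > feeders[j] + k then mergeGoF k dogs feeders fuel i (j + 1) count
      else mergeGoF k dogs feeders fuel (i + 1) (j + 1) (count + 1)
    else count

def feedDog_alt (sp : List String) (k : Int) : Int :=
  mergeGoF k (idxsOf sp "D") (idxsOf sp "F") ((idxsOf sp "D").length + (idxsOf sp "F").length) 0 0 0

-- ===== PRECONDITION & SPEC =====
def Spec_feedDog (sp : List String) (k : Int) (out : Int) : Prop := out = feedDog_alt sp k
instance (sp : List String) (k : Int) (out : Int) : Decidable (Spec_feedDog sp k out) := by unfold Spec_feedDog; infer_instance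

-- ===== CLAIM (what is proved, stated in full; the proofs are below) =====
def Claim_equal_feedDog : Prop := ∀ (sp : List String) (k : Int), Dom_feedDog sp k → Spec_feedDog sp k (feedDog sp k)

-- ===== LEMMAS AND PROOFS =====

-- proof-side abstraction of B's merge loop: structural merge on the two suffix lists
def matchGo (k : Int) : List Int → List Int → Int
  | [], _ => 0
  | _ :: _, [] => 0
  | d :: ds, f :: fs =>
    if d < f - k then matchGo k ds (f :: fs)
    else if d > f + k then matchGo k (d :: ds) fs
    else 1 + matchGo k ds fs
termination_by ds fs => ds.length + fs.length

theorem matchGo_nil_right (k : Int) (D : List Int) : matchGo k D [] = 0 := by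
  cases D <;> simp [matchGo]

theorem matchGo_nil_left (k : Int) (F : List Int) : matchGo k [] F = 0 := by
  simp [matchGo]

theorem mergeGoF_eq_matchGo (k : Int) (dogs feeders : List Int) :
    ∀ (fuel i j : Nat) (c : Int), dogs.length - i + (feeders.length - j) ≤ fuel →
      mergeGoF k dogs feeders fuel i j c = c + matchGo k (dogs.drop i) (feeders.drop j) := by
  intro fuel i j c
  fun_induction mergeGoF k dogs feeders fuel i j c with
  | case1 i j c =>
    intro hfuel
    rw [List.drop_eq_nil_of_le (by omega), matchGo_nil_left]
    ring
  | case2 fuel i j c h hlt ih =>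
    intro hfuel
    rw [ih (by omega), List.drop_eq_getElem_cons h.1, List.drop_eq_getElem_cons h.2, matchGo,
      if_pos hlt]
  | case3 fuel i j c h hlt hgt ih =>
    intro hfuel
    rw [ih (by omega), List.drop_eq_getElem_cons h.1, List.drop_eq_getElem_cons h.2, matchGo,
      if_neg hlt, if_pos hgt]
  | case4 fuel i j c h hlt hgt ih =>
    intro hfuel
    rw [ih (by omega), List.drop_eq_getElem_cons h.1, List.drop_eq_getElem_cons h.2, matchGo,
      if_neg hlt, if_neg hgt]
    ring
  | case5 fuel i j c h =>
    intro hfuel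
    push Not at h
    rcases Nat.lt_or_ge i dogs.length with hi | hi
    · have hj : feeders.length ≤ j := by have := h hi; omega
      rw [List.drop_eq_nil_of_le hj, matchGo_nil_right]
      ring
    · rw [List.drop_eq_nil_of_le hi]
      rw [matchGo_nil_left]
      ring

theorem matchGo_zero (k : Int) (D F : List Int) (h : ∀ d ∈ D, ∀ f ∈ F, d < f - k) :
    matchGo k D F = 0 := by
  fun_induction matchGo k D F with
  | case1 F => rfl
  | case2 d ds => rfl
  | case3 d ds f fs hlt ih =>
    exact ih (fun x hx g hg => h x (List.mem_cons_of_mem d hx) g hg)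
  | case4 d ds f fs hlt hgt ih =>
    exact absurd (h d List.mem_cons_self f List.mem_cons_self) hlt
  | case5 d ds f fs hlt hgt ih =>
    exact absurd (h d List.mem_cons_self f List.mem_cons_self) hlt

theorem matchGo_neg (k : Int) (hk : k < 0) (D F : List Int) : matchGo k D F = 0 := by
  fun_induction matchGo k D F with
  | case1 F => rfl
  | case2 d ds => rfl
  | case3 d ds f fs hlt ih => exact ih
  | case4 d ds f fs hlt hgt ih => exact ih
  | case5 d ds f fs hlt hgt ih => omega

theorem matchGo_drop_dogs (k : Int) (f : Int) (fs D2 : List Int) :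
    ∀ D1 : List Int, (∀ d ∈ D1, d < f - k) →
      matchGo k (D1 ++ D2) (f :: fs) = matchGo k D2 (f :: fs) := by
  intro D1
  induction D1 with
  | nil => intro _; rfl
  | cons d ds ih =>
    intro h
    rw [List.cons_append, matchGo, if_pos (h d List.mem_cons_self)]
    exact ih (fun x hx => h x (List.mem_cons_of_mem d hx))

-- characterisation of the comprehension idxsOf
theorem mem_idxsOf (sp : List String) (c : String) (x : Int) :
    x ∈ idxsOf sp c ↔ ∃ (q : Nat) (h : q < sp.length), x = (q : Int) ∧ sp[q] = c := by
  unfold idxsOf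
  rw [List.mem_filterMap]
  constructor
  · rintro ⟨a, ha, hfa⟩
    rw [PySem.List.mem_enumerate_iff] at ha
    obtain ⟨q, hq, rfl⟩ := ha
    by_cases hd : sp[q] = c
    · refine ⟨q, hq, ?_, hd⟩
      simp [hd] at hfa
      omega
    · simp [hd] at hfa
  · rintro ⟨q, hq, rfl, hd⟩
    refine ⟨((q : Int), sp[q]), ?_, ?_⟩
    · rw [PySem.List.mem_enumerate_iff]
      exact ⟨q, hq, by simp⟩
    · simp [hd]

theorem pairwise_idxsOf (sp : List String) (c : String) : (idxsOf sp c).Pairwise (· < ·) := by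
  unfold idxsOf
  rw [List.pairwise_filterMap]
  refine (PySem.List.pairwise_lt_enumerate sp 0).imp ?_
  intro a b hab x hx y hy
  by_cases ha : a.2 = c <;> simp [ha] at hx
  by_cases hb : b.2 = c <;> simp [hb] at hy
  omega

-- splitting a sorted list's ≥-filter at a midpoint
theorem filter_split (l : List Int) (hl : l.Pairwise (· < ·)) (a b : Int) (hab : a ≤ b) :
    l.filter (fun d => decide (a ≤ d)) =
      l.filter (fun d => decide (a ≤ d ∧ d < b)) ++ l.filter (fun d => decide (b ≤ d)) := by
  induction l with
  | nil => rfl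
  | cons x t ih =>
    rw [List.pairwise_cons] at hl
    obtain ⟨hx, ht⟩ := hl
    by_cases hax : a ≤ x
    · by_cases hxb : x < b
      · have e1 := decide_eq_true (p := a ≤ x) hax
        have e2 := decide_eq_true (p := a ≤ x ∧ x < b) ⟨hax, hxb⟩
        have e3 := decide_eq_false (p := b ≤ x) (by omega)
        simp only [List.filter_cons, e1, e2, e3, if_true, Bool.false_eq_true, if_false,
          List.cons_append, ih ht]
      · have hbx : b ≤ x := by omega
        have e1 := decide_eq_true (p := a ≤ x) hax
        have e2 := decide_eq_false (p := a ≤ x ∧ x < b) (by omega)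
        have e3 := decide_eq_true (p := b ≤ x) hbx
        simp only [List.filter_cons, e1, e2, e3, if_true, Bool.false_eq_true, if_false]
        have hmid : t.filter (fun d => decide (a ≤ d ∧ d < b)) = [] := by
          rw [List.filter_eq_nil_iff]
          intro d hd
          have := hx d hd
          simp only [decide_eq_true_eq]
          omega
        rw [hmid, List.nil_append]
        have h1 : t.filter (fun d => decide (a ≤ d)) = t :=
          List.filter_eq_self.mpr (fun d hd => by have := hx d hd; exact decide_eq_true (by omega))
        have h2 : t.filter (fun d => decide (b ≤ d)) = t :=
          List.filter_eq_self.mpr (fun d hd => by have := hx d hd; exact decide_eq_true (by omega))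
        rw [h1, h2]
    · have hbx : ¬ b ≤ x := by omega
      simp only [List.filter_cons, decide_eq_true_eq, if_neg hax, if_neg hbx,
        if_neg (show ¬ (a ≤ x ∧ x < b) by omega)]
      exact ih ht

-- the ≥-filter of a sorted list at one of its members starts with that member
theorem filter_ge_of_mem (l : List Int) (hl : l.Pairwise (· < ·)) (a : Int) (ha : a ∈ l) :
    l.filter (fun d => decide (a ≤ d)) = a :: l.filter (fun d => decide (a + 1 ≤ d)) := by
  induction l with
  | nil => cases ha
  | cons x t ih =>
    rw [List.pairwise_cons] at hl
    obtain ⟨hx, ht⟩ := hl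
    rcases List.mem_cons.mp ha with rfl | hat
    · simp only [List.filter_cons, decide_eq_true_eq, if_pos (le_refl a),
        if_neg (show ¬ a + 1 ≤ a by omega)]
      congr 1
      apply List.filter_congr
      intro d hd
      have := hx d hd
      rw [decide_eq_true (show a ≤ d by omega), decide_eq_true (show a + 1 ≤ d by omega)]
    · have hxa : x < a := hx a hat
      simp only [List.filter_cons, decide_eq_true_eq, if_neg (show ¬ a ≤ x by omega),
        if_neg (show ¬ a + 1 ≤ x by omega)]
      exact ih ht hat

-- remaining (not yet passed) dogs / feeders, as B's merge sees them
def dogsGe (sp : List String) (nd : Nat) : List Int :=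
  (idxsOf sp "D").filter (fun d => decide ((nd : Int) ≤ d))

def feedersGe (sp : List String) (i : Nat) : List Int :=
  (idxsOf sp "F").filter (fun f => decide ((i : Int) ≤ f))

-- feedWhile facts
theorem feedWhileF_ge (sp : List String) (k : Int) (i : Nat) (fuel nd : Nat) :
    nd ≤ feedWhileF sp k i fuel nd := by
  fun_induction feedWhileF sp k i fuel nd <;> omega

theorem feedWhile_ge (sp : List String) (k : Int) (i : Nat) (nd : Nat) :
    nd ≤ feedWhile sp k i nd := feedWhileF_ge sp k i sp.length nd

theorem feedWhileF_bound (sp : List String) (k : Int) (i : Nat) (fuel nd : Nat) :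
    (feedWhileF sp k i fuel nd : Int) ≤ max (nd : Int) (min ((i : Int) + k + 1) (sp.length : Int)) := by
  fun_induction feedWhileF sp k i fuel nd <;> omega

theorem feedWhile_bound (sp : List String) (k : Int) (i : Nat) (nd : Nat) :
    (feedWhile sp k i nd : Int) ≤ max (nd : Int) (min ((i : Int) + k + 1) (sp.length : Int)) :=
  feedWhileF_bound sp k i sp.length nd

theorem feedWhileF_skips (sp : List String) (k : Int) (i : Nat) (fuel nd : Nat) :
    ∀ q (hq : q < sp.length), nd ≤ q → q < feedWhileF sp k i fuel nd →
      (q : Int) < min ((i : Int) + k + 1) (sp.length : Int) ∧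
        (sp[q] = "D" → ¬ |(q : Int) - (i : Int)| ≤ k) := by
  fun_induction feedWhileF sp k i fuel nd with
  | case1 nd =>
    intro q hq h1 h2
    omega
  | case2 fuel nd h hlt hD ih =>
    intro q hq h1 h2
    rcases Nat.eq_or_lt_of_le h1 with rfl | hgt
    · exact ⟨h, fun hd => absurd hd (by simpa using hD)⟩
    · exact ih q hq hgt h2
  | case3 fuel nd h hlt hD habs =>
    intro q hq h1 h2
    omega
  | case4 fuel nd h hlt hD habs ih =>
    intro q hq h1 h2
    rcases Nat.eq_or_lt_of_le h1 with rfl | hgt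
    · exact ⟨h, fun _ => habs⟩
    · exact ih q hq hgt h2
  | case5 fuel nd h =>
    intro q hq h1 h2
    omega

theorem feedWhile_skips (sp : List String) (k : Int) (i : Nat) (nd : Nat) :
    ∀ q (hq : q < sp.length), nd ≤ q → q < feedWhile sp k i nd →
      (q : Int) < min ((i : Int) + k + 1) (sp.length : Int) ∧
        (sp[q] = "D" → ¬ |(q : Int) - (i : Int)| ≤ k) :=
  feedWhileF_skips sp k i sp.length nd

theorem feedWhileF_stop (sp : List String) (k : Int) (i : Nat) (fuel nd : Nat)
    (hfuel : sp.length ≤ nd + fuel)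
    (h : (feedWhileF sp k i fuel nd : Int) < min ((i : Int) + k + 1) (sp.length : Int)) :
    ∃ hlen : feedWhileF sp k i fuel nd < sp.length,
      sp[feedWhileF sp k i fuel nd] = "D" ∧ |(feedWhileF sp k i fuel nd : Int) - (i : Int)| ≤ k := by
  fun_induction feedWhileF sp k i fuel nd with
  | case1 nd => omega
  | case2 fuel nd h' hlt hD ih => exact ih (by omega) h
  | case3 fuel nd h' hlt hD habs => exact ⟨hlt, by simpa using hD, habs⟩
  | case4 fuel nd h' hlt hD habs ih => exact ih (by omega) h
  | case5 fuel nd h' => omega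

theorem feedWhile_stop (sp : List String) (k : Int) (i : Nat) (nd : Nat)
    (h : (feedWhile sp k i nd : Int) < min ((i : Int) + k + 1) (sp.length : Int)) :
    ∃ hlen : feedWhile sp k i nd < sp.length,
      sp[feedWhile sp k i nd] = "D" ∧ |(feedWhile sp k i nd : Int) - (i : Int)| ≤ k :=
  feedWhileF_stop sp k i sp.length nd (by omega) h

-- chunk of skipped dogs lies strictly left of the window [i-k, i+k]
theorem skipped_dogs_lt (sp : List String) (k : Int) (i nd : Nat) (w : Nat)
    (hw : w ≤ feedWhile sp k i nd) :
    ∀ d ∈ (idxsOf sp "D").filter (fun d => decide ((nd : Int) ≤ d ∧ d < (w : Int))),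
      d < (i : Int) - k := by
  intro d hd
  rw [List.mem_filter] at hd
  obtain ⟨hmem, hcond⟩ := hd
  simp only [decide_eq_true_eq] at hcond
  obtain ⟨q, hq, rfl, hqd⟩ := (mem_idxsOf sp "D" d).mp hmem
  have hsk := feedWhile_skips sp k i nd q hq (by omega) (by omega)
  have h1 := hsk.1
  have h2 := hsk.2 hqd
  rw [not_le, lt_abs] at h2
  rcases h2 with h2 | h2 <;> omega

-- negative k: neither program ever matches
theorem feedGo_neg (sp : List String) (k : Int) (hk : k < 0) :
    ∀ (fuel i nd : Nat) (c : Int), (nd : Int) ≤ (i : Int) → feedGoF sp k fuel i nd c = c := by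
  intro fuel i nd c
  fun_induction feedGoF sp k fuel i nd c with
  | case1 i nd c => intro _; rfl
  | case2 fuel i nd c hi hF ih =>
    intro hnd
    exact ih (by omega)
  | case3 fuel i nd c hi hF hret =>
    intro _; rfl
  | case4 fuel i nd c hi hF hret hmatch ih =>
    intro hnd
    exfalso
    have := abs_nonneg ((feedWhile sp k i nd : Int) - (i : Int))
    omega
  | case5 fuel i nd c hi hF hret hmatch ih =>
    intro hnd
    apply ih
    have h1 := feedWhile_ge sp k i nd
    have h2 := feedWhile_bound sp k i nd
    omega
  | case6 fuel i nd c hi => intro _; rfl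

-- the main invariant: A's loop state (i, nd) corresponds to B's merge on the
-- suffixes of dogs ≥ nd and feeders ≥ i
theorem feedGo_eq (sp : List String) (k : Int) (hk : 0 ≤ k) :
    ∀ (n i nd : Nat) (c : Int), sp.length - i ≤ n → nd ≤ sp.length →
      feedGoF sp k n i nd c = c + matchGo k (dogsGe sp nd) (feedersGe sp i) := by
  intro n
  induction n with
  | zero =>
    intro i nd c hfuel hnd
    rw [feedGoF]
    have hF : feedersGe sp i = [] := by
      rw [feedersGe, List.filter_eq_nil_iff]
      intro f hf
      obtain ⟨q, hq, rfl, _⟩ := (mem_idxsOf sp "F" f).mp hf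
      simp only [decide_eq_true_eq]
      omega
    rw [hF, matchGo_nil_right]
    ring
  | succ n ih =>
    intro i nd c hfuel hnd
    by_cases hi : i < sp.length
    swap
    · rw [feedGoF, dif_neg hi]
      have hF : feedersGe sp i = [] := by
        rw [feedersGe, List.filter_eq_nil_iff]
        intro f hf
        obtain ⟨q, hq, rfl, _⟩ := (mem_idxsOf sp "F" f).mp hf
        simp only [decide_eq_true_eq]
        omega
      rw [hF, matchGo_nil_right]
      ring
    by_cases hF : sp[i] = "F"
    swap
    · rw [feedGoF, dif_pos hi, if_pos hF]
      have hsame : feedersGe sp i = feedersGe sp (i + 1) := by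
        rw [feedersGe, feedersGe]
        apply List.filter_congr
        intro f hf
        obtain ⟨q, hq, rfl, hqF⟩ := (mem_idxsOf sp "F" f).mp hf
        have hqi : q ≠ i := by rintro rfl; exact hF hqF
        rcases Nat.lt_or_ge q i with hlt | hge
        · rw [decide_eq_false (show ¬ ((i : Nat) : Int) ≤ ((q : Nat) : Int) by omega),
            decide_eq_false (show ¬ (((i + 1 : Nat)) : Int) ≤ ((q : Nat) : Int) by omega)]
        · rw [decide_eq_true (show ((i : Nat) : Int) ≤ ((q : Nat) : Int) by omega),
            decide_eq_true (show (((i + 1 : Nat)) : Int) ≤ ((q : Nat) : Int) by omega)]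
      rw [hsame]
      exact ih (i + 1) nd c (by omega) hnd
    -- sp[i] = "F": the feeder list starts with i
    have hiF : (i : Int) ∈ idxsOf sp "F" := (mem_idxsOf sp "F" _).mpr ⟨i, hi, rfl, hF⟩
    have hFi : feedersGe sp i = (i : Int) :: feedersGe sp (i + 1) := by
      rw [feedersGe, filter_ge_of_mem _ (pairwise_idxsOf sp "F") _ hiF]
      simp only [feedersGe, show (((i + 1 : Nat)) : Int) = (i : Int) + 1 by push_cast; ring]
    set w := feedWhile sp k i nd with hwdef
    have hwge : nd ≤ w := feedWhile_ge sp k i nd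
    have hwbd := feedWhile_bound sp k i nd
    have hwle : w ≤ sp.length := by omega
    have hsplit : dogsGe sp nd =
        (idxsOf sp "D").filter (fun d => decide ((nd : Int) ≤ d ∧ d < (w : Int))) ++ dogsGe sp w := by
      rw [dogsGe, dogsGe]
      exact filter_split _ (pairwise_idxsOf sp "D") _ _ (by omega)
    have hchunk := skipped_dogs_lt sp k i nd w (le_refl w)
    by_cases hstop : (w : Int) < min ((i : Int) + k + 1) (sp.length : Int)
    · -- inner loop broke at an in-range dog w: both programs match it
      obtain ⟨hwlen, hwD, hwabs⟩ := feedWhile_stop sp k i nd hstop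
      have hwmem : (w : Int) ∈ idxsOf sp "D" := (mem_idxsOf sp "D" _).mpr ⟨w, hwlen, rfl, hwD⟩
      have hDw : dogsGe sp w = (w : Int) :: dogsGe sp (w + 1) := by
        rw [dogsGe, filter_ge_of_mem _ (pairwise_idxsOf sp "D") _ hwmem]
        simp only [dogsGe, show (((w + 1 : Nat)) : Int) = (w : Int) + 1 by push_cast; ring]
      rw [feedGoF, dif_pos hi, if_neg (not_not_intro hF), ← hwdef,
        if_neg (show ¬ w = sp.length by omega),
        if_pos (⟨by rw [List.getElem?_eq_getElem hwlen]; simpa using hwD, hwabs⟩ :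
          (sp[w]?).getD "" = "D" ∧ |(w : Int) - (i : Int)| ≤ k),
        ih (i + 1) (w + 1) (c + 1) (by omega) (by omega),
        hFi, hsplit, hDw, matchGo_drop_dogs k _ _ _ _
          (fun d hd => by have := hchunk d hd; omega),
        matchGo]
      rw [abs_le] at hwabs
      rw [if_neg (show ¬ (w : Int) < (i : Int) - k by omega),
        if_neg (show ¬ (w : Int) > (i : Int) + k by omega)]
      ring
    · -- no dog in reach: A skips the feeder (or returns), B drops the feeder
      have hweq : (w : Int) = max (nd : Int) (min ((i : Int) + k + 1) (sp.length : Int)) := by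
        omega
      by_cases hret : w = sp.length
      · -- A's early return: every remaining dog is left of every remaining feeder's window
        rw [feedGoF, dif_pos hi, if_neg (not_not_intro hF), ← hwdef, if_pos hret]
        have hzero : matchGo k (dogsGe sp nd) (feedersGe sp i) = 0 := by
          apply matchGo_zero
          intro d hd f hf
          rw [dogsGe, List.mem_filter] at hd
          obtain ⟨hmem, hcond⟩ := hd
          simp only [decide_eq_true_eq] at hcond
          obtain ⟨q, hq, rfl, hqD⟩ := (mem_idxsOf sp "D" (_ : Int)).mp hmem
          have hsk := feedWhile_skips sp k i nd q hq (by omega) (by omega)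
          have h2 := hsk.2 hqD
          rw [not_le, lt_abs] at h2
          rw [feedersGe, List.mem_filter] at hf
          obtain ⟨hfmem, hfcond⟩ := hf
          simp only [decide_eq_true_eq] at hfcond
          have h1 := hsk.1
          rcases h2 with h2 | h2 <;> omega
        rw [hzero]
        ring
      · -- A advances to w (no match); B: head dog of dogsGe w, if any, is beyond i+k
        have hminlt : min ((i : Int) + k + 1) (sp.length : Int) = (i : Int) + k + 1 := by
          rcases le_or_gt ((i : Int) + k + 1) (sp.length : Int) with h | h
          · omega
          · exfalso
            have : min ((i : Int) + k + 1) (sp.length : Int) = (sp.length : Int) := by omega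
            omega
        have hwgebd : (i : Int) + k + 1 ≤ (w : Int) := by omega
        rw [feedGoF, dif_pos hi, if_neg (not_not_intro hF), ← hwdef, if_neg hret,
          if_neg (show ¬ ((sp[w]?).getD "" = "D" ∧ |(w : Int) - (i : Int)| ≤ k) by
            rintro ⟨-, habs⟩
            rw [abs_le] at habs
            omega),
          ih (i + 1) w c (by omega) hwle, hFi, hsplit,
          matchGo_drop_dogs k _ _ _ _ (fun d hd => by have := hchunk d hd; omega)]
      -- matchGo k (dogsGe sp w) (i :: feedersGe sp (i+1)) drops the feeder i
        rcases hDw : dogsGe sp w with _ | ⟨d, ds⟩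
        · rw [matchGo_nil_left, matchGo_nil_left]
        · have hdmem : d ∈ dogsGe sp w := by rw [hDw]; exact List.mem_cons_self
          rw [dogsGe, List.mem_filter] at hdmem
          obtain ⟨hmem, hcond⟩ := hdmem
          simp only [decide_eq_true_eq] at hcond
          rw [matchGo, if_neg (show ¬ d < (i : Int) - k by omega),
            if_pos (show d > (i : Int) + k by omega)]

-- ===== VERDICT (by name: the statement is the Claim_ definition above) =====
theorem feedDog_spec : Claim_equal_feedDog := by
  intro sp k _
  unfold Spec_feedDog feedDog feedDog_alt
  rw [mergeGoF_eq_matchGo k _ _ _ 0 0 0 (by omega), List.drop_zero, List.drop_zero]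
  rcases lt_or_ge k 0 with hk | hk
  · rw [feedGo_neg sp k hk sp.length 0 0 0 (by simp), matchGo_neg k hk]
    ring
  · rw [feedGo_eq sp k hk sp.length 0 0 0 (by omega) (by omega)]
    have hD : dogsGe sp 0 = idxsOf sp "D" := by
      rw [dogsGe]
      apply List.filter_eq_self.mpr
      intro d hd
      obtain ⟨q, hq, rfl, _⟩ := (mem_idxsOf sp "D" d).mp hd
      simp
    have hF : feedersGe sp 0 = idxsOf sp "F" := by
      rw [feedersGe]
      apply List.filter_eq_self.mpr
      intro f hf
      obtain ⟨q, hq, rfl, _⟩ := (mem_idxsOf sp "F" f).mp hf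
      simp
    rw [hD, hF]
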